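-- pv_equiv track=rewrite | github.com/ag-arpitgoyal/Assignment-4-final-code | hash_table.py | secondary_hash
-- ===== SOURCE A (Python) =====
-- def secondary_hash(key, z2, c2):
--     hash_value = 0
--     current_power = 1
--     for i, char in enumerate(key):
--         if 'a' <= char <= 'z':
--             char_value = ord(char) - ord('a')
--         elif 'A' <= char <= 'Z':
--             char_value = ord(char) - ord('A') + 26
--         else:
--             continue
--
--         hash_value = (hash_value + char_value * current_power) % c2
--         current_power = (current_power * z2) % c2
--
--     return c2 - hash_value
-- ===== SOURCE B (Python) =====
-- def secondary_hash(key, z2, c2):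
--     vals = []
--     for char in key:
--         if 'a' <= char <= 'z':
--             vals.append(ord(char) - ord('a'))
--         elif 'A' <= char <= 'Z':
--             vals.append(ord(char) - ord('A') + 26)
--     hash_value = 0
--     for v in reversed(vals):
--         hash_value = (hash_value * z2 + v) % c2
--     return c2 - hash_value
-- ===== Notes on version B (the rewrite author's own statement) =====
-- stated objective: alternative
-- what changed: B first extracts the letter values in a forward pass and then computes the hash by Horner's rule over that list in reverse, eliminating A's running current_power variable.
import Mathlib
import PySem

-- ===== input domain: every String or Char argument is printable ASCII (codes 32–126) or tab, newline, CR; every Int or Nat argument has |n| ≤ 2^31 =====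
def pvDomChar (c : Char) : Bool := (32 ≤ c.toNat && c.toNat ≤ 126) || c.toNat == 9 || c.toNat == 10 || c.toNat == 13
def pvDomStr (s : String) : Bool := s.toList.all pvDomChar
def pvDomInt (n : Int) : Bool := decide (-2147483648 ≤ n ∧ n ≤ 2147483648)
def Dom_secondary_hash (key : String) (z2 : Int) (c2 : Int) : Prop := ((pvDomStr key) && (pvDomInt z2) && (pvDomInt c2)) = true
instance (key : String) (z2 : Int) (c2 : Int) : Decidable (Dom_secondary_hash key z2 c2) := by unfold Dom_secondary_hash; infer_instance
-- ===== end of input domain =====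

-- B replaces A's running current_power by a forward letter-value extraction pass followed
-- by Horner's rule over that list in reverse (objective: alternative decomposition).

-- ===== PORT A =====
-- one loop step of A: classify the character, then update (hash_value, current_power)
def pvStepA (z2 c2 : Int) (st : Int × Int) (ch : Char) : Int × Int :=
  if 'a' ≤ ch ∧ ch ≤ 'z' then
    ((PySem.Int.mod (st.1 + ((ch.toNat : Int) - 97) * st.2) c2), (PySem.Int.mod (st.2 * z2) c2))
  else if 'A' ≤ ch ∧ ch ≤ 'Z' then
    ((PySem.Int.mod (st.1 + ((ch.toNat : Int) - 65 + 26) * st.2) c2), (PySem.Int.mod (st.2 * z2) c2))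
  else st

def secondary_hash (key : String) (z2 : Int) (c2 : Int) : Int :=
  c2 - (key.toList.foldl (pvStepA z2 c2) (0, 1)).1

-- ===== PORT B =====
-- B's first pass: the value of a letter, none for non-letters
def pvCharVal (ch : Char) : Option Int :=
  if 'a' ≤ ch ∧ ch ≤ 'z' then some ((ch.toNat : Int) - 97)
  else if 'A' ≤ ch ∧ ch ≤ 'Z' then some ((ch.toNat : Int) - 65 + 26)
  else none

-- B's second pass: one Horner step
def pvStepB (z2 c2 : Int) (h v : Int) : Int := PySem.Int.mod (h * z2 + v) c2

def secondary_hash_alt (key : String) (z2 : Int) (c2 : Int) : Int :=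
  c2 - ((key.toList.filterMap pvCharVal).reverse.foldl (pvStepB z2 c2) 0)

-- ===== PRECONDITION & SPEC =====
-- Python A raises ZeroDivisionError exactly when c2 = 0 and key contains an ASCII letter
-- (the '%' is only reached for letters); B raises there too, so Pre_ excludes those inputs.
def Pre_secondary_hash (key : String) (z2 : Int) (c2 : Int) : Prop :=
  c2 ≠ 0 ∨ ∀ ch ∈ key.toList, ¬('a' ≤ ch ∧ ch ≤ 'z') ∧ ¬('A' ≤ ch ∧ ch ≤ 'Z')
instance (key : String) (z2 : Int) (c2 : Int) : Decidable (Pre_secondary_hash key z2 c2) := by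
  unfold Pre_secondary_hash; infer_instance

def pvWitness_secondary_hash : String × Int × Int := ("aZ b!", 31, 97)

def Spec_secondary_hash (key : String) (z2 : Int) (c2 : Int) (out : Int) : Prop := out = secondary_hash_alt key z2 c2
instance (key : String) (z2 : Int) (c2 : Int) (out : Int) : Decidable (Spec_secondary_hash key z2 c2 out) := by unfold Spec_secondary_hash; infer_instance

-- ===== CLAIM (what is proved, stated in full; the proofs are below) =====
def Claim_equal_secondary_hash : Prop := ∀ (key : String) (z2 : Int) (c2 : Int), Dom_secondary_hash key z2 c2 → Pre_secondary_hash key z2 c2 → Spec_secondary_hash key z2 c2 (secondary_hash key z2 c2)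

-- ===== LEMMAS AND PROOFS =====

-- Σ v_i · z2^i over a value list, written as a structural recursion
def pvPoly (z2 : Int) : List Int → Int
  | [] => 0
  | v :: t => v + z2 * pvPoly z2 t

-- Python '%' (= Int.fmod) depends only on the residue class of its first argument
theorem pv_mod_congr (b x y : Int) (h : b ∣ x - y) : PySem.Int.mod x b = PySem.Int.mod y b := by
  obtain ⟨k, hk⟩ := h
  have hx : x = y + b * k := by linarith
  show Int.fmod x b = Int.fmod y b
  rw [hx, Int.add_mul_fmod_self_left]

theorem pv_fmod_sub_dvd (b a : Int) : b ∣ PySem.Int.mod a b - a := by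
  show b ∣ Int.fmod a b - a
  rw [Int.fmod_def]; exact ⟨-(a.fdiv b), by ring⟩

-- A's loop over the characters equals the same loop restricted to the letter values
theorem pv_foldA_filter (z2 c2 : Int) (l : List Char) (st : Int × Int) :
    l.foldl (pvStepA z2 c2) st
      = (l.filterMap pvCharVal).foldl
          (fun st v => ((PySem.Int.mod (st.1 + v * st.2) c2), (PySem.Int.mod (st.2 * z2) c2))) st := by
  induction l generalizing st with
  | nil => rfl
  | cons ch t ih =>
    simp only [List.foldl_cons, List.filterMap_cons, pvStepA, pvCharVal]
    by_cases h1 : 'a' ≤ ch ∧ ch ≤ 'z'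
    · simp [h1, ih, pvCharVal]
    · by_cases h2 : 'A' ≤ ch ∧ ch ≤ 'Z' <;> simp [h1, h2, ih, pvCharVal]

-- A's loop over a nonempty value list computes (h + p·pvPoly vs) % c2
theorem pv_loopA (z2 c2 : Int) (vs : List Int) (h p : Int) (hne : vs ≠ []) :
    (vs.foldl (fun st v => ((PySem.Int.mod (st.1 + v * st.2) c2), (PySem.Int.mod (st.2 * z2) c2))) (h, p)).1
      = PySem.Int.mod (h + p * pvPoly z2 vs) c2 := by
  induction vs generalizing h p with
  | nil => exact absurd rfl hne
  | cons v t ih =>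
    cases t with
    | nil =>
      simp only [List.foldl_cons, List.foldl_nil, pvPoly]
      exact pv_mod_congr c2 _ _ ⟨0, by ring⟩
    | cons w u =>
      rw [List.foldl_cons]
      rw [ih (PySem.Int.mod (h + v * p) c2) (PySem.Int.mod (p * z2) c2) (by simp)]
      apply pv_mod_congr
      have d1 := pv_fmod_sub_dvd c2 (h + v * p)
      have d2 := pv_fmod_sub_dvd c2 (p * z2)
      obtain ⟨k1, hk1⟩ := d1
      obtain ⟨k2, hk2⟩ := d2
      refine ⟨k1 + k2 * pvPoly z2 (w :: u), ?_⟩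
      simp only [pvPoly]
      linear_combination hk1 + (w + z2 * pvPoly z2 u) * hk2

-- raw (un-modded) Horner step
theorem pv_rawB_congr (z2 c2 : Int) (ws : List Int) (h h' : Int) (hd : c2 ∣ h - h') :
    c2 ∣ ws.foldl (fun h v => h * z2 + v) h - ws.foldl (fun h v => h * z2 + v) h' := by
  induction ws generalizing h h' with
  | nil => simpa using hd
  | cons v t ih =>
    simp only [List.foldl_cons]
    apply ih
    obtain ⟨k, hk⟩ := hd
    exact ⟨k * z2, by linear_combination z2 * hk⟩

-- B's modded Horner loop over a nonempty list equals the raw Horner value mod c2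
theorem pv_loopB_raw (z2 c2 : Int) (ws : List Int) (h : Int) (hne : ws ≠ []) :
    ws.foldl (pvStepB z2 c2) h = PySem.Int.mod (ws.foldl (fun h v => h * z2 + v) h) c2 := by
  induction ws generalizing h with
  | nil => exact absurd rfl hne
  | cons v t ih =>
    cases t with
    | nil => rfl
    | cons w u =>
      rw [List.foldl_cons, ih _ (by simp), List.foldl_cons (f := fun h v => h * z2 + v)]
      exact pv_mod_congr c2 _ _
        (pv_rawB_congr z2 c2 (w :: u) _ _ (by simpa [pvStepB] using pv_fmod_sub_dvd c2 (h * z2 + v)))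

-- raw Horner over the reversed list produces the ascending-power polynomial
theorem pv_horner_reverse (z2 : Int) (vs : List Int) (h : Int) :
    vs.reverse.foldl (fun h v => h * z2 + v) h = h * z2 ^ vs.length + pvPoly z2 vs := by
  induction vs generalizing h with
  | nil => simp [pvPoly]
  | cons v t ih =>
    simp only [List.reverse_cons, List.foldl_append, List.foldl_cons, List.foldl_nil,
      pvPoly, List.length_cons, ih]
    ring

-- ===== VERDICT (by name: the statement is the Claim_ definition above) =====
theorem secondary_hash_spec : Claim_equal_secondary_hash := by
  intro key z2 c2 _ _
  unfold Spec_secondary_hash secondary_hash secondary_hash_alt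
  rw [pv_foldA_filter]
  rcases heq : key.toList.filterMap pvCharVal with _ | ⟨v, t⟩
  · simp
  · rw [pv_loopA z2 c2 _ 0 1 (by simp), pv_loopB_raw z2 c2 _ 0 (by simp),
      pv_horner_reverse]
    have : (0 : Int) + 1 * pvPoly z2 (v :: t) = 0 * z2 ^ (v :: t).length + pvPoly z2 (v :: t) := by ring
    rw [this]
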